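-- pv_equiv track=rewrite | github.com/kwaipilot/SWE-Compass | swecompass/evaluators/selected/parsers.py | parse_log_scipy
-- ===== SOURCE A (Python) =====
-- def parse_log_scipy(log: str) -> dict[str, str]:
--
--     status_map = {}
--
--     for line in log.splitlines():
--         line = line.strip()
--         if not line:
--             continue
--
--         parts = line.split()
--         if len(parts) < 2:
--             continue
--
--         status = None
--         status_index = -1
--         for i, part in enumerate(parts):
--             if part in ['PASSED', 'FAILED', 'SKIPPED', 'XFAIL', 'XPASS', 'ERROR']:
--                 status = part
--                 status_index = i
--                 break
--
--         if status is None: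
--             continue
--
--         test_path = ' '.join(parts[:status_index]).strip()
--
--         if '::' in test_path:
--             file_path, test_name = test_path.split('::', 1)
--
--             status_map[test_path] = status
--
--     return status_map
-- ===== SOURCE B (Python) =====
-- _STATUSES = ('PASSED', 'FAILED', 'SKIPPED', 'XFAIL', 'XPASS', 'ERROR')
--
--
-- def parse_log_scipy(log: str) -> dict[str, str]:
--     status_map = {}
--     for line in log.splitlines():
--         parts = line.split()
--         # position of the earliest status token = min over the 6 statuses of
--         # the first position at which each occurs (no per-token scan for statuses)
--         idxs = [parts.index(s) for s in _STATUSES if s in parts]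
--         if not idxs:
--             continue
--         i = min(idxs)
--         test_path = ' '.join(parts[:i])
--         if '::' in test_path:
--             status_map[test_path] = parts[i]
--     return status_map
-- ===== Notes on version B (the rewrite author's own statement) =====
-- stated objective: alternative
-- what changed: Instead of A's per-token enumerate-scan that breaks at the first status, B computes per line the first-occurrence index of each of the six status strings with list.index and takes the minimum of those indices, also dropping A's redundant strip/empty-line/len<2 checks.
import Mathlib
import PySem

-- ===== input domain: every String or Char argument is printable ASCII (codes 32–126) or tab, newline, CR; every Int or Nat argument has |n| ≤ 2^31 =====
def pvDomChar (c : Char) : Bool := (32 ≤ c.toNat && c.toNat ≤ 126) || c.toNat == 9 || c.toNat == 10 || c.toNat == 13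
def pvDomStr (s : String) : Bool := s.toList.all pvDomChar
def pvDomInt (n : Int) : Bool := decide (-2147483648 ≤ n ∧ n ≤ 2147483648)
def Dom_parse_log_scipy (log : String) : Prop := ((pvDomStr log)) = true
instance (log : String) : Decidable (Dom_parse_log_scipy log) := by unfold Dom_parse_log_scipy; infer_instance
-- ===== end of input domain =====

-- B replaces A's per-token first-status scan by computing, per line, the index of each of the
-- six status strings with list.index and taking the minimum (alternative decomposition; same cost).

-- ===== PORT A =====
def pvStatuses : List String := ["PASSED", "FAILED", "SKIPPED", "XFAIL", "XPASS", "ERROR"]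

-- A's inner 'for i, part in enumerate(parts): … break' loop
def pvFindStatusA : List (Int × String) → Option (String × Int)
  | [] => none
  | (i, p) :: rest => if p ∈ pvStatuses then some (p, i) else pvFindStatusA rest

def pvLineA (d : PySem.Dict String String) (line : String) : PySem.Dict String String :=
  let line := PySem.Str.strip line
  if line = "" then d
  else
    let parts := PySem.Str.split₀ line
    if parts.length < 2 then d
    else
      match pvFindStatusA (PySem.List.enumerate parts 0) with
      | none => d
      | some (status, status_index) =>
        let test_path :=
          PySem.Str.strip (PySem.Str.join " " (PySem.List.slice parts none (some status_index)))
        if PySem.Str.isIn "::" test_path then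
          -- A's "file_path, test_name = test_path.split('::', 1)" binds unused locals; no effect
          d.insert test_path status
        else d

def parse_log_scipy (log : String) : List (String × String) :=
  ((PySem.Str.splitlines log).foldl pvLineA PySem.Dict.empty).items

-- ===== PORT B =====
-- "[parts.index(s) for s in _STATUSES if s in parts]": index? returns none exactly when
-- s ∉ parts, so filterMap is the guarded comprehension verbatim
def pvStatusIdxs (parts : List String) : List Nat :=
  pvStatuses.filterMap (fun s => PySem.List.index? parts s)

def pvLineB (m : PySem.Dict String String) (line : String) : PySem.Dict String String :=
  let parts := PySem.Str.split₀ line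
  match PySem.List.min? (pvStatusIdxs parts) (fun x => x) with
  | none => m
  | some i =>
    let test_path := PySem.Str.join " " (PySem.List.slice parts none (some (i : Int)))
    if PySem.Str.isIn "::" test_path then
      match PySem.List.pyGet? parts (i : Int) with  -- parts[i]; i is an index of a member, always in range
      | some st => m.insert test_path st
      | none => m
    else m

def parse_log_scipy_alt (log : String) : List (String × String) :=
  ((PySem.Str.splitlines log).foldl pvLineB PySem.Dict.empty).items

-- ===== PRECONDITION & SPEC =====
def Spec_parse_log_scipy (log : String) (out : List (String × String)) : Prop := out = parse_log_scipy_alt log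
instance (log : String) (out : List (String × String)) : Decidable (Spec_parse_log_scipy log out) := by unfold Spec_parse_log_scipy; infer_instance

-- ===== CLAIM (what is proved, stated in full; the proofs are below) =====
def Claim_equal_parse_log_scipy : Prop := ∀ (log : String), Dom_parse_log_scipy log → Spec_parse_log_scipy log (parse_log_scipy log)

-- ===== LEMMAS AND PROOFS =====

-- a split₀ token: nonempty and free of whitespace
def pvWord (t : List Char) : Prop := t ≠ [] ∧ ∀ c ∈ t, PySem.Chars.isspace c = false

theorem pv_go_words (cs : List Char) : ∀ (cur : List Char) (acc : List (List Char)),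
    (∀ t ∈ acc, pvWord t) → (∀ c ∈ cur, PySem.Chars.isspace c = false) →
    ∀ t ∈ PySem.Chars.split₀.go cs cur acc, pvWord t := by
  induction cs with
  | nil =>
    intro cur acc hacc hcur t ht
    by_cases hc : cur.isEmpty
    · simp only [PySem.Chars.split₀.go, if_pos hc, List.mem_reverse] at ht
      exact hacc t ht
    · simp only [PySem.Chars.split₀.go, if_neg hc, List.mem_reverse, List.mem_cons] at ht
      rcases ht with rfl | ht
      · refine ⟨by simpa using (List.isEmpty_eq_false_iff.mp (by simpa using hc)), ?_⟩
        intro c hcmem; exact hcur c (List.mem_reverse.mp hcmem)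
      · exact hacc t ht
  | cons c rest ih =>
    intro cur acc hacc hcur t ht
    by_cases hsp : PySem.Chars.isspace c
    · by_cases hc : cur.isEmpty
      · simp only [PySem.Chars.split₀.go, if_pos hsp, if_pos hc] at ht
        exact ih [] acc hacc (by simp) t ht
      · simp only [PySem.Chars.split₀.go, if_pos hsp, if_neg hc] at ht
        refine ih [] (cur.reverse :: acc) ?_ (by simp) t ht
        intro u hu
        rcases List.mem_cons.mp hu with rfl | hu
        · refine ⟨by simpa using (List.isEmpty_eq_false_iff.mp (by simpa using hc)), ?_⟩
          intro d hd; exact hcur d (List.mem_reverse.mp hd)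
        · exact hacc u hu
    · simp only [PySem.Chars.split₀.go, if_neg hsp] at ht
      refine ih (c :: cur) acc hacc ?_ t ht
      intro d hd
      rcases List.mem_cons.mp hd with rfl | hd
      · simpa using hsp
      · exact hcur d hd

theorem pv_split₀_words (cs : List Char) : ∀ t ∈ PySem.Chars.split₀ cs, pvWord t :=
  pv_go_words cs [] [] (by simp) (by simp)

theorem pv_lstrip_cons (c : Char) (t : List Char) (h : PySem.Chars.isspace c = false) :
    PySem.Chars.lstrip (c :: t) = c :: t := by
  simp [PySem.Chars.lstrip, h]

theorem pv_rstrip_concat (t : List Char) (c : Char) (h : PySem.Chars.isspace c = false) :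
    PySem.Chars.rstrip (t ++ [c]) = t ++ [c] := by
  simp [PySem.Chars.rstrip, h]

theorem pv_join_head (w : List Char) (rest : List (List Char)) (hw : pvWord w) :
    ∃ c t, PySem.Chars.join [' '] (w :: rest) = c :: t ∧ PySem.Chars.isspace c = false := by
  obtain ⟨hne, hchar⟩ := hw
  obtain ⟨c, w', rfl⟩ := List.exists_cons_of_ne_nil hne
  cases rest with
  | nil => exact ⟨c, w', by simp [PySem.Chars.join_singleton], hchar c (by simp)⟩
  | cons y l =>
    refine ⟨c, w' ++ [' '] ++ PySem.Chars.join [' '] (y :: l), ?_, hchar c (by simp)⟩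
    rw [PySem.Chars.join_cons_cons]; simp

theorem pv_join_last (ws : List (List Char)) : ws ≠ [] → (∀ w ∈ ws, pvWord w) →
    ∃ t c, PySem.Chars.join [' '] ws = t ++ [c] ∧ PySem.Chars.isspace c = false := by
  induction ws with
  | nil => intro hne; cases hne rfl
  | cons w rest ih =>
    intro _ h
    cases rest with
    | nil =>
      obtain ⟨hne, hchar⟩ := h w (by simp)
      rcases List.eq_nil_or_concat w with rfl | ⟨t, c, rfl⟩
      · cases hne rfl
      · exact ⟨t, c, by simp [PySem.Chars.join_singleton], hchar c (by simp)⟩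
    | cons y l =>
      obtain ⟨t, c, heq, hc⟩ := ih (by simp) (fun u hu => h u (by simp [hu]))
      refine ⟨w ++ ' ' :: t, c, ?_, hc⟩
      rw [PySem.Chars.join_cons_cons, heq]; simp

theorem pv_strip_join (ws : List (List Char)) (h : ∀ w ∈ ws, pvWord w) :
    PySem.Chars.strip (PySem.Chars.join [' '] ws) = PySem.Chars.join [' '] ws := by
  cases ws with
  | nil => rfl
  | cons w rest =>
    obtain ⟨c, t, hhead, hc⟩ := pv_join_head w rest (h w (by simp))
    obtain ⟨t2, c2, hlast, hc2⟩ := pv_join_last (w :: rest) (by simp) h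
    show PySem.Chars.rstrip (PySem.Chars.lstrip _) = _
    rw [hhead, pv_lstrip_cons _ _ hc, ← hhead, hlast, pv_rstrip_concat _ _ hc2]

theorem pv_str_strip_join (ws : List String) (h : ∀ w ∈ ws, pvWord w.toList) :
    PySem.Str.strip (PySem.Str.join " " ws) = PySem.Str.join " " ws := by
  have h2 : ∀ t ∈ ws.map String.toList, pvWord t := by
    intro t ht
    obtain ⟨w, hw, rfl⟩ := List.mem_map.mp ht
    exact h w hw
  have key : PySem.Chars.strip ((PySem.Str.join " " ws).toList) = (PySem.Str.join " " ws).toList := by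
    rw [PySem.Str.toList_join]
    exact pv_strip_join _ h2
  show String.ofList (PySem.Chars.strip (PySem.Str.join " " ws).toList) = _
  rw [key, String.ofList_toList]

-- split₀ ignores leading and trailing whitespace: split₀ (strip s) = split₀ s
theorem pv_go_allspace (ws : List Char) (h : ∀ c ∈ ws, PySem.Chars.isspace c = true) :
    ∀ (cur : List Char) (acc : List (List Char)),
    PySem.Chars.split₀.go ws cur acc = PySem.Chars.split₀.go [] cur acc := by
  induction ws with
  | nil => intro cur acc; rfl
  | cons c t ih =>
    intro cur acc
    have hsp : PySem.Chars.isspace c = true := h c (by simp)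
    have ht : ∀ d ∈ t, PySem.Chars.isspace d = true := fun d hd => h d (by simp [hd])
    by_cases hc : cur.isEmpty
    · simp only [PySem.Chars.split₀.go, if_pos hsp, if_pos hc, ih ht]
      have : cur = [] := List.isEmpty_iff.mp hc
      subst this
      simp
    · simp only [PySem.Chars.split₀.go, if_pos hsp, if_neg hc, ih ht]
      simp

theorem pv_go_append_space (cs ws : List Char) (h : ∀ c ∈ ws, PySem.Chars.isspace c = true) :
    ∀ (cur : List Char) (acc : List (List Char)),
    PySem.Chars.split₀.go (cs ++ ws) cur acc = PySem.Chars.split₀.go cs cur acc := by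
  induction cs with
  | nil =>
    intro cur acc
    simpa using pv_go_allspace ws h cur acc
  | cons c t ih =>
    intro cur acc
    by_cases hsp : PySem.Chars.isspace c
    · by_cases hc : cur.isEmpty
      · simp only [List.cons_append, PySem.Chars.split₀.go, if_pos hsp, if_pos hc, ih]
      · simp only [List.cons_append, PySem.Chars.split₀.go, if_pos hsp, if_neg hc, ih]
    · simp only [List.cons_append, PySem.Chars.split₀.go, if_neg hsp, ih]

theorem pv_split₀_rstrip (cs : List Char) :
    PySem.Chars.split₀ (PySem.Chars.rstrip cs) = PySem.Chars.split₀ cs := by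
  have hdecomp : cs = PySem.Chars.rstrip cs ++ (cs.reverse.takeWhile PySem.Chars.isspace).reverse := by
    unfold PySem.Chars.rstrip
    rw [← List.reverse_append, List.takeWhile_append_dropWhile, List.reverse_reverse]
  have hsp : ∀ c ∈ (cs.reverse.takeWhile PySem.Chars.isspace).reverse, PySem.Chars.isspace c = true := by
    intro c hc
    exact List.mem_takeWhile_imp (List.mem_reverse.mp hc)
  conv_rhs => rw [hdecomp]
  unfold PySem.Chars.split₀
  rw [pv_go_append_space _ _ hsp]

theorem pv_split₀_lstrip (cs : List Char) :
    PySem.Chars.split₀ (PySem.Chars.lstrip cs) = PySem.Chars.split₀ cs := by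
  induction cs with
  | nil => rfl
  | cons c t ih =>
    by_cases hsp : PySem.Chars.isspace c
    · have hl : PySem.Chars.lstrip (c :: t) = PySem.Chars.lstrip t := by
        simp [PySem.Chars.lstrip, hsp]
      have hgo : PySem.Chars.split₀ (c :: t) = PySem.Chars.split₀ t := by
        unfold PySem.Chars.split₀
        simp only [PySem.Chars.split₀.go, if_pos hsp, List.isEmpty_nil, if_true]
      rw [hl, ih, hgo]
    · rw [pv_lstrip_cons c t (by simpa using hsp)]

theorem pv_split₀_strip (s : String) :
    PySem.Str.split₀ (PySem.Str.strip s) = PySem.Str.split₀ s := by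
  show (PySem.Chars.split₀ (PySem.Str.strip s).toList).map String.ofList
      = (PySem.Chars.split₀ s.toList).map String.ofList
  rw [PySem.Str.toList_strip]
  show (PySem.Chars.split₀ (PySem.Chars.rstrip (PySem.Chars.lstrip s.toList))).map _ = _
  rw [pv_split₀_rstrip, pv_split₀_lstrip]

-- the first status token and its position, with a Nat index
def pvFirstIdx : List String → Option (String × Nat)
  | [] => none
  | t :: rest => if t ∈ pvStatuses then some (t, 0) else (pvFirstIdx rest).map (fun p => (p.1, p.2 + 1))

theorem pv_findA_enum (xs : List String) : ∀ (k : Int),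
    pvFindStatusA (PySem.List.enumerate xs k) =
      (pvFirstIdx xs).map (fun p => (p.1, k + (p.2 : Int))) := by
  induction xs with
  | nil => intro k; simp [PySem.List.enumerate_nil, pvFindStatusA, pvFirstIdx]
  | cons t rest ih =>
    intro k
    rw [PySem.List.enumerate_cons]
    by_cases ht : t ∈ pvStatuses
    · simp [pvFindStatusA, pvFirstIdx, ht]
    · simp only [pvFindStatusA, pvFirstIdx, if_neg ht, ih (k + 1)]
      cases hp : pvFirstIdx rest with
      | none => simp
      | some p => simp; ring

-- B's min-of-indexes computation, characterised against pvFirstIdx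
def pvB (parts : List String) : Option (String × Nat) :=
  match PySem.List.min? (pvStatusIdxs parts) (fun x => x) with
  | none => none
  | some i => (PySem.List.pyGet? parts (i : Int)).map (fun st => (st, i))

theorem pv_foldl_min_succ (t : List Nat) : ∀ (x : Nat),
    (t.map (· + 1)).foldl min (x + 1) = t.foldl min x + 1 := by
  induction t with
  | nil => intro x; rfl
  | cons y l ih =>
    intro x
    simp only [List.map_cons, List.foldl_cons]
    rw [show min (x + 1) (y + 1) = min x y + 1 by omega]
    exact ih _

theorem pv_min_map (l : List Nat) :
    PySem.List.min? (l.map (· + 1)) (fun x => x) = (PySem.List.min? l (fun x => x)).map (· + 1) := by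
  cases l with
  | nil => rfl
  | cons x t =>
    rw [List.map_cons, PySem.List.min?_id_cons, PySem.List.min?_id_cons]
    simp [pv_foldl_min_succ]

theorem pv_idxs_cons_not (t : String) (rest : List String) (ht : t ∉ pvStatuses) :
    pvStatusIdxs (t :: rest) = (pvStatusIdxs rest).map (· + 1) := by
  unfold pvStatusIdxs
  rw [List.map_filterMap]
  apply List.filterMap_congr
  intro s hs
  have hne : t ≠ s := fun h => ht (h ▸ hs)
  rw [PySem.List.index?_cons_of_ne rest hne]

theorem pv_min_zero_of_status (t : String) (rest : List String) (ht : t ∈ pvStatuses) :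
    PySem.List.min? (pvStatusIdxs (t :: rest)) (fun x => x) = some 0 := by
  have h0 : (0 : Nat) ∈ pvStatusIdxs (t :: rest) := by
    unfold pvStatusIdxs
    exact List.mem_filterMap.mpr ⟨t, ht, PySem.List.index?_cons_self t rest⟩
  cases hm : PySem.List.min? (pvStatusIdxs (t :: rest)) (fun x => x) with
  | none =>
    rw [PySem.List.min?_eq_none_iff] at hm
    rw [hm] at h0
    cases h0
  | some m =>
    have h2 : m ≤ 0 := PySem.List.min?_isMin hm 0 h0
    simp [Nat.le_zero.mp h2]

theorem pv_B_eq_firstIdx (parts : List String) : pvB parts = pvFirstIdx parts := by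
  induction parts with
  | nil => rfl
  | cons t rest ih =>
    by_cases ht : t ∈ pvStatuses
    · unfold pvB
      rw [pv_min_zero_of_status t rest ht]
      simp [pvFirstIdx, ht]
    · unfold pvB
      rw [pv_idxs_cons_not t rest ht, pv_min_map]
      unfold pvB at ih
      cases hm : PySem.List.min? (pvStatusIdxs rest) (fun x => x) with
      | none =>
        rw [hm] at ih
        simp only [pvFirstIdx, if_neg ht, ← ih]
        simp
      | some i =>
        rw [hm] at ih
        have hget : PySem.List.pyGet? (t :: rest) ((i : Nat) + 1 : Int) =
            PySem.List.pyGet? rest (i : Int) := PySem.List.pyGet?_cons_succ t rest i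
        simp only [pvFirstIdx, if_neg ht, ← ih, Option.map_some]
        push_cast
        rw [hget]
        cases PySem.List.pyGet? rest (i : Int) <;> simp

-- the canonical per-line behaviour both ports reduce to
def pvCanon (d : PySem.Dict String String) (parts : List String) : PySem.Dict String String :=
  match pvFirstIdx parts with
  | none => d
  | some (st, i) =>
    if PySem.Str.isIn "::" (PySem.Str.join " " (parts.take i)) then
      d.insert (PySem.Str.join " " (parts.take i)) st
    else d

theorem pv_lineB_canon (d : PySem.Dict String String) (line : String) :
    pvLineB d line = pvCanon d (PySem.Str.split₀ line) := by
  have hB := pv_B_eq_firstIdx (PySem.Str.split₀ line)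
  unfold pvB at hB
  cases hm : PySem.List.min? (pvStatusIdxs (PySem.Str.split₀ line)) (fun x => x) with
  | none =>
    rw [hm] at hB
    have hF : pvFirstIdx (PySem.Str.split₀ line) = none := hB.symm
    simp [pvLineB, pvCanon, hm, hF]
  | some i =>
    rw [hm] at hB
    have hF : pvFirstIdx (PySem.Str.split₀ line) =
        (PySem.List.pyGet? (PySem.Str.split₀ line) (i : Int)).map (fun st => (st, i)) := hB.symm
    cases hg : PySem.List.pyGet? (PySem.Str.split₀ line) (i : Int) with
    | none =>
      rw [hg] at hF
      simp only [Option.map_none] at hF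
      simp [pvLineB, pvCanon, hm, hF, hg]
    | some st =>
      rw [hg] at hF
      simp only [Option.map_some] at hF
      simp [pvLineB, pvCanon, hm, hF, hg, PySem.List.slice_to_natCast]

theorem pv_lineA_canon (d : PySem.Dict String String) (line : String) :
    pvLineA d line = pvCanon d (PySem.Str.split₀ (PySem.Str.strip line)) := by
  unfold pvLineA
  by_cases hempty : PySem.Str.strip line = ""
  · rw [if_pos hempty, hempty]
    rfl
  · rw [if_neg hempty]
    have hwords : ∀ w ∈ PySem.Str.split₀ (PySem.Str.strip line), pvWord w.toList := by
      intro w hw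
      simp only [PySem.Str.split₀] at hw
      obtain ⟨t, ht, rfl⟩ := List.mem_map.mp hw
      rw [String.toList_ofList]
      exact pv_split₀_words _ t ht
    set parts := PySem.Str.split₀ (PySem.Str.strip line) with hparts
    by_cases hlen : parts.length < 2
    · rw [if_pos hlen]
      unfold pvCanon
      match parts, hwords with
      | [], _ => simp [pvFirstIdx]
      | [a], hwords =>
        have hfalse : PySem.Chars.isIn [':', ':'] ([] : List Char) = false := by decide
        by_cases ha : a ∈ pvStatuses
        · simp [pvFirstIdx, ha, hfalse]
        · simp [pvFirstIdx, ha]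
      | a :: b :: t2, _ => simp at hlen
    · rw [if_neg hlen]
      rw [pv_findA_enum parts 0]
      unfold pvCanon
      cases hp : pvFirstIdx parts with
      | none => simp
      | some p =>
        obtain ⟨st, i⟩ := p
        have hstrip := pv_str_strip_join (parts.take i)
          (fun w hw => hwords w (List.mem_of_mem_take hw))
        simp [hstrip]

theorem pv_line_eq (d : PySem.Dict String String) (line : String) :
    pvLineA d line = pvLineB d line := by
  rw [pv_lineA_canon, pv_lineB_canon, pv_split₀_strip]

theorem pv_fun_eq : pvLineA = pvLineB :=
  funext fun d => funext fun line => pv_line_eq d line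

-- ===== VERDICT (by name: the statement is the Claim_ definition above) =====
theorem parse_log_scipy_spec : Claim_equal_parse_log_scipy := by
  intro log _
  unfold Spec_parse_log_scipy parse_log_scipy parse_log_scipy_alt
  rw [pv_fun_eq]
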